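-- pv_equiv track=rewrite | github.com/teamarnab/my-python-projects | Love Calculator/love_calculator.py | count_love
-- ===== SOURCE A (Python) =====
-- true_love = 'truelove'
--
-- def count_love(name1, name2):   # function takes two names as input
--     love_count = 0              # a count variable innitalized with 0
--     for letter in name1:        # a for loop to check if each letter is present in the word 'true love'
--         if letter in true_love:
--             love_count += 1     # if letter is present count increases by one
--     for letter in name2:        # a for loop to check if each letter is present in the word 'true love'
--         if letter in true_love:
--             love_count += 1     # if letter is present count increases by one
--
--     return love_count           # function returns count
-- ===== SOURCE B (Python) =====
-- true_love = 'truelove'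
--
-- def count_love(name1, name2):
--     # Build one frequency table of both names, then sum the tallies of the
--     # distinct letters of the love word (reversed traversal vs. A).
--     counts = {}
--     for letter in name1:
--         counts[letter] = counts.get(letter, 0) + 1
--     for letter in name2:
--         counts[letter] = counts.get(letter, 0) + 1
--     return sum(counts.get(c, 0) for c in set(true_love))
-- ===== Notes on version B (the rewrite author's own statement) =====
-- stated objective: alternative
-- what changed: B builds a frequency table of both names once and sums the tallies of the distinct letters of 'truelove', instead of testing each name letter against the love word.
import Mathlib
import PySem

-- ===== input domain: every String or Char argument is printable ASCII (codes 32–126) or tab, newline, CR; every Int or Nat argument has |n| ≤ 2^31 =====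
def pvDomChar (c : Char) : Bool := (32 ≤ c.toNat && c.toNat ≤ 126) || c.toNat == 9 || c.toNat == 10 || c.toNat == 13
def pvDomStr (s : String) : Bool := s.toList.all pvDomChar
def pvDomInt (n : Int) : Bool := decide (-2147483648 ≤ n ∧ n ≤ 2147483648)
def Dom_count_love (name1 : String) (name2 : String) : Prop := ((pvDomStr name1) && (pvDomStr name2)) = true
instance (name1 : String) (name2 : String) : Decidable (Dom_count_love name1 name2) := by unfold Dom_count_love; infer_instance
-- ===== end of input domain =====

-- B builds one frequency table of both names and sums the tallies of the distinct love letters (alternative decomposition; same result proved equal).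


-- ===== PORT A =====
def loveChars : List Char := "truelove".toList

def count_love (name1 : String) (name2 : String) : Int :=
  let c1 := name1.toList.foldl
    (fun love_count letter => if loveChars.contains letter then love_count + 1 else love_count) 0
  name2.toList.foldl
    (fun love_count letter => if loveChars.contains letter then love_count + 1 else love_count) c1

-- ===== PORT B =====
def count_love_alt (name1 : String) (name2 : String) : Int :=
  let counts : PySem.Dict Char Int :=
    name1.toList.foldl (fun d letter => d.insert letter (d.getD letter 0 + 1)) PySem.Dict.empty
  let counts2 :=
    name2.toList.foldl (fun d letter => d.insert letter (d.getD letter 0 + 1)) counts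
  ((PySem.Set.ofList loveChars).map (fun c => counts2.getD c 0)).sum

-- ===== PRECONDITION & SPEC =====
def Spec_count_love (name1 : String) (name2 : String) (out : Int) : Prop := out = count_love_alt name1 name2
instance (name1 : String) (name2 : String) (out : Int) : Decidable (Spec_count_love name1 name2 out) := by unfold Spec_count_love; infer_instance

-- ===== CLAIM (what is proved, stated in full; the proofs are below) =====
def Claim_equal_count_love : Prop := ∀ (name1 : String) (name2 : String), Dom_count_love name1 name2 → Spec_count_love name1 name2 (count_love name1 name2)

-- ===== LEMMAS AND PROOFS =====

-- summing the per-letter counts over a duplicate-free list of letters is counting membership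
lemma sum_map_count_eq_countP (s : List Char) (hs : s.Nodup) (l : List Char) :
    (s.map (fun c => (l.count c : Int))).sum = (l.countP (fun x => s.contains x) : Int) := by
  induction l with
  | nil => simp
  | cons x l ih =>
    have hsum : (s.map (fun c => ((x :: l).count c : Int))).sum
        = (s.map (fun c => (l.count c : Int))).sum
          + (s.map (fun c => (if c == x then (1:Int) else 0))).sum := by
      rw [← PySem.List.sum_map_add_int]
      apply congrArg
      apply List.map_congr_left
      intro c _
      by_cases h : c = x
      · subst h
        rw [List.count_cons]
        push_cast
        simp
      · rw [List.count_cons]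
        push_cast
        simp [h, Ne.symm h]
    have hone : (s.map (fun c => (if c == x then (1:Int) else 0))).sum
        = (s.count x : Int) := by
      rw [PySem.List.sum_map_ite_one_zero]
      congr 1
    rw [hsum, hone, ih]
    by_cases hx : x ∈ s
    · rw [List.count_eq_one_of_mem hs hx]
      simp [List.contains_eq_mem, hx]
    · rw [List.count_eq_zero_of_not_mem hx]
      simp [List.contains_eq_mem, hx]

theorem count_love_eq (name1 name2 : String) :
    count_love name1 name2 = count_love_alt name1 name2 := by
  unfold count_love count_love_alt
  rw [PySem.List.foldl_if_add_one, PySem.List.foldl_if_add_one]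
  have hget : ∀ c : Char,
      ((name2.toList.foldl (fun d letter => d.insert letter (d.getD letter 0 + 1))
        (name1.toList.foldl (fun d letter => d.insert letter (d.getD letter 0 + 1))
          PySem.Dict.empty)).getD c 0)
      = (name1.toList.count c : Int) + (name2.toList.count c : Int) := by
    intro c
    rw [PySem.Dict.getD_foldl_insert_add_one, PySem.Dict.getD_foldl_insert_add_one]
    simp [PySem.Dict.getD_empty]
  simp only [hget]
  rw [PySem.List.sum_map_add_int,
      sum_map_count_eq_countP _ (PySem.Set.nodup_ofList loveChars),
      sum_map_count_eq_countP _ (PySem.Set.nodup_ofList loveChars)]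
  have hcp : ∀ l : List Char,
      List.countP (fun x => List.contains (PySem.Set.ofList loveChars) x) l
        = List.countP loveChars.contains l := by
    intro l
    apply List.countP_congr
    intro a _
    simp [List.contains_eq_mem, PySem.Set.mem_ofList]
  rw [hcp, hcp]
  ring

-- ===== VERDICT (by name: the statement is the Claim_ definition above) =====
theorem count_love_spec : Claim_equal_count_love := by
  intro name1 name2 _
  exact count_love_eq name1 name2
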